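-- pv_equiv track=rewrite | github.com/onlyfeng/engram | src/engram/logbook/scm_sync_tasks/svn.py | generate_diffstat
-- ===== SOURCE A (Python) =====
-- from typing import Any, Dict, Iterable, List, Optional
--
-- def generate_diffstat(diff_content: str) -> str:
--     """生成 diffstat"""
--     if not diff_content or not diff_content.strip():
--         return ""
--     current_file: Optional[str] = None
--     stats: Dict[str, Dict[str, int]] = {}
--     for line in diff_content.splitlines():
--         if line.startswith("Index: "):
--             current_file = line[len("Index: ") :].strip()
--             stats.setdefault(current_file, {"insertions": 0, "deletions": 0})
--             continue
--         if current_file is None: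
--             continue
--         if line.startswith("+++ ") or line.startswith("--- ") or line.startswith("@@") or line.startswith("==="):
--             continue
--         if line.startswith("+"):
--             stats[current_file]["insertions"] += 1
--         elif line.startswith("-"):
--             stats[current_file]["deletions"] += 1
--     if not stats:
--         return ""
--     lines = []
--     total_ins = sum(v["insertions"] for v in stats.values())
--     total_del = sum(v["deletions"] for v in stats.values())
--     for name, counts in stats.items():
--         lines.append(
--             f"{name} | {counts['insertions']} insertion(s)(+), {counts['deletions']} deletion(s)(-)"
--         )
--     lines.append(
--         f"{len(stats)} file(s) changed, {total_ins} insertion(s)(+), {total_del} deletion(s)(-)"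
--     )
--     return "\n".join(lines)
-- ===== SOURCE B (Python) =====
-- from typing import Dict, List, Optional
--
-- def generate_diffstat(diff_content: str) -> str:
--     """生成 diffstat (two-pass: group lines per Index header, then count)"""
--     if not diff_content or not diff_content.strip():
--         return ""
--     groups: Dict[str, List[str]] = {}
--     current: Optional[str] = None
--     for line in diff_content.splitlines():
--         if line.startswith("Index: "):
--             current = line[len("Index: "):].strip()
--             groups.setdefault(current, [])
--         elif current is not None:
--             groups[current].append(line)
--     if not groups:
--         return ""
--     out: List[str] = []
--     total_ins = 0
--     total_del = 0
--     for name, body in groups.items():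
--         ins = sum(1 for l in body if l.startswith("+") and not l.startswith("+++ "))
--         dels = sum(1 for l in body if l.startswith("-") and not l.startswith("--- "))
--         out.append(f"{name} | {ins} insertion(s)(+), {dels} deletion(s)(-)")
--         total_ins += ins
--         total_del += dels
--     out.append(f"{len(groups)} file(s) changed, {total_ins} insertion(s)(+), {total_del} deletion(s)(-)")
--     return "\n".join(out)
-- ===== Notes on version B (the rewrite author's own statement) =====
-- stated objective: alternative
-- what changed: B replaces A's single pass with incrementally updated per-file counter dicts by a two-pass grouping: first partition the lines into an ordered dict of per-file body lists keyed by Index headers, then count insertions/deletions per body with predicate counts and build the output.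
import Mathlib
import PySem

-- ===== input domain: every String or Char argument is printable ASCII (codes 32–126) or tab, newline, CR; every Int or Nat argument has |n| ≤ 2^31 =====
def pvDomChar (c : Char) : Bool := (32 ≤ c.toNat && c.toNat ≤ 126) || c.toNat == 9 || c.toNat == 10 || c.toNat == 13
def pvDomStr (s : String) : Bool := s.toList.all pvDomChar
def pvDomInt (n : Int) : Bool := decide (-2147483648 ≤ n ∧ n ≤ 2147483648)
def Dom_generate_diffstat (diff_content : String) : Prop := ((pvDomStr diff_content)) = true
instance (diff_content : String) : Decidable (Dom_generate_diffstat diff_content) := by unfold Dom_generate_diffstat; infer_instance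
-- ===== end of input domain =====

-- B is an alternative same-cost decomposition: A keeps per-file counter dicts updated line by line in one pass;
-- B first groups the body lines per Index header, then counts insertions/deletions per group in a second pass.

-- B replaces A's one-pass incrementally-updated per-file counter dicts by a two-pass decomposition:
-- group the body lines per Index header first, then count and render per group (same cost; return values proved equal).

-- ===== PORT A =====
-- loop body of A's for-loop over splitlines; state = (current_file, stats).
-- 'stats[current_file]["…"] += 1' is ported with Dict.modify: exact here, since the preceding
-- setdefault has always inserted the key, so Python's lookup never raises.
def stepA (st : Option String × PySem.Dict String (PySem.Dict String Int)) (line : String) :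
    Option String × PySem.Dict String (PySem.Dict String Int) :=
  if PySem.Str.startswith line "Index: " then
    let current_file := PySem.Str.strip (PySem.Str.slice line (some 7) none)
    (some current_file, st.2.setdefault current_file (PySem.Dict.mk [("insertions", 0), ("deletions", 0)]))
  else
    match st.1 with
    | none => st
    | some current_file =>
      if PySem.Str.startswith line "+++ " || PySem.Str.startswith line "--- " ||
         PySem.Str.startswith line "@@" || PySem.Str.startswith line "===" then st
      else if PySem.Str.startswith line "+" then
        (st.1, st.2.modify current_file PySem.Dict.empty (fun d => d.modify "insertions" 0 (· + 1)))
      else if PySem.Str.startswith line "-" then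
        (st.1, st.2.modify current_file PySem.Dict.empty (fun d => d.modify "deletions" 0 (· + 1)))
      else st

-- ===== PORT B =====
-- pass 1 loop body of B: collect every body line under the most recent Index header.
def stepB (st : Option String × PySem.Dict String (List String)) (line : String) :
    Option String × PySem.Dict String (List String) :=
  if PySem.Str.startswith line "Index: " then
    let current := PySem.Str.strip (PySem.Str.slice line (some 7) none)
    (some current, st.2.setdefault current [])
  else
    match st.1 with
    | none => st
    | some current => (st.1, st.2.modify current [] (fun b => b ++ [line]))

def generate_diffstat (diff_content : String) : String :=
  if diff_content == "" || PySem.Str.strip diff_content == "" then ""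
  else
    let stats := ((PySem.Str.splitlines diff_content).foldl stepA (none, PySem.Dict.empty)).2
    if stats.items = [] then ""
    else
      let total_ins := (stats.values.map (fun v => v.getD "insertions" 0)).sum
      let total_del := (stats.values.map (fun v => v.getD "deletions" 0)).sum
      let lines := stats.items.foldl (fun acc p =>
        acc ++ [p.1 ++ " | " ++ PySem.Int.toStr (p.2.getD "insertions" 0) ++ " insertion(s)(+), " ++
          PySem.Int.toStr (p.2.getD "deletions" 0) ++ " deletion(s)(-)"]) []
      PySem.Str.join "\n" (lines ++ [PySem.Int.toStr (stats.size : Int) ++ " file(s) changed, " ++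
        PySem.Int.toStr total_ins ++ " insertion(s)(+), " ++ PySem.Int.toStr total_del ++ " deletion(s)(-)"])

-- pass 2 of B is inside generate_diffstat_alt: one fold over the grouped items building
-- the per-file lines and the two totals ('sum(1 for l in body if …)' is ported as countP).
def generate_diffstat_alt (diff_content : String) : String :=
  if diff_content == "" || PySem.Str.strip diff_content == "" then ""
  else
    let groups := ((PySem.Str.splitlines diff_content).foldl stepB (none, PySem.Dict.empty)).2
    if groups.items = [] then ""
    else
      let acc := groups.items.foldl (fun (st : List String × Int × Int) p =>
        let ins : Int := (p.2.countP (fun l => PySem.Str.startswith l "+" && !PySem.Str.startswith l "+++ ") : Int)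
        let dels : Int := (p.2.countP (fun l => PySem.Str.startswith l "-" && !PySem.Str.startswith l "--- ") : Int)
        (st.1 ++ [p.1 ++ " | " ++ PySem.Int.toStr ins ++ " insertion(s)(+), " ++
            PySem.Int.toStr dels ++ " deletion(s)(-)"],
         st.2.1 + ins, st.2.2 + dels)) ([], 0, 0)
      PySem.Str.join "\n" (acc.1 ++ [PySem.Int.toStr (groups.size : Int) ++ " file(s) changed, " ++
        PySem.Int.toStr acc.2.1 ++ " insertion(s)(+), " ++ PySem.Int.toStr acc.2.2 ++ " deletion(s)(-)"])


-- ===== PRECONDITION & SPEC =====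
def Spec_generate_diffstat (diff_content : String) (out : String) : Prop := out = generate_diffstat_alt diff_content
instance (diff_content : String) (out : String) : Decidable (Spec_generate_diffstat diff_content out) := by unfold Spec_generate_diffstat; infer_instance

-- ===== CLAIM (what is proved, stated in full; the proofs are below) =====
def Claim_equal_generate_diffstat : Prop := ∀ (diff_content : String), Dom_generate_diffstat diff_content → Spec_generate_diffstat diff_content (generate_diffstat diff_content)

-- ===== LEMMAS AND PROOFS =====

def pIns (l : String) : Bool := PySem.Str.startswith l "+" && !PySem.Str.startswith l "+++ "
def pDel (l : String) : Bool := PySem.Str.startswith l "-" && !PySem.Str.startswith l "--- "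
def cdict (body : List String) : PySem.Dict String Int :=
  PySem.Dict.mk [("insertions", (body.countP pIns : Int)), ("deletions", (body.countP pDel : Int))]
def mkStats (g : PySem.Dict String (List String)) : PySem.Dict String (PySem.Dict String Int) :=
  PySem.Dict.mk (g.items.map (fun p => (p.1, cdict p.2)))

theorem head_of_startswith (l : String) (c : Char) (cs : List Char)
    (h : PySem.Str.startswith l (String.ofList (c :: cs)) = true) : ∃ t, l.toList = c :: t := by
  rw [PySem.Str.startswith_eq, PySem.Chars.startswith_iff] at h
  have : (String.ofList (c :: cs)).toList = c :: cs := by simp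
  rw [this] at h
  obtain ⟨t, ht⟩ := h
  exact ⟨cs ++ t, by simpa using ht.symm⟩

theorem contains_mkStats (g : PySem.Dict String (List String)) (k : String) :
    (mkStats g).contains k = g.contains k := by
  simp [mkStats, PySem.Dict.contains, List.any_map]
  rfl

theorem get?_mkStats (g : PySem.Dict String (List String)) (k : String) :
    (mkStats g).get? k = (g.get? k).map cdict := by
  simp [mkStats, PySem.Dict.get?, List.find?_map]
  rfl

theorem cdict_nil : cdict [] = PySem.Dict.mk [("insertions", 0), ("deletions", 0)] := rfl

theorem setdefault_mkStats (g : PySem.Dict String (List String)) (name : String) :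
    (mkStats g).setdefault name (PySem.Dict.mk [("insertions", 0), ("deletions", 0)]) =
      mkStats (g.setdefault name []) := by
  rw [← cdict_nil]
  unfold PySem.Dict.setdefault
  rw [contains_mkStats]
  split
  · rfl
  · simp [mkStats]


theorem modify_ins_lit (i d : Int) :
    (PySem.Dict.mk [(("insertions":String), i), ("deletions", d)]).modify "insertions" 0 (· + 1) =
      PySem.Dict.mk [("insertions", i + 1), ("deletions", d)] := rfl

theorem modify_del_lit (i d : Int) :
    (PySem.Dict.mk [(("insertions":String), i), ("deletions", d)]).modify "deletions" 0 (· + 1) =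
      PySem.Dict.mk [("insertions", i), ("deletions", d + 1)] := rfl

theorem not_pIns_and_pDel (line : String) : ¬ (pIns line = true ∧ pDel line = true) := by
  rintro ⟨h1, h2⟩
  simp only [pIns, pDel, Bool.and_eq_true] at h1 h2
  obtain ⟨t1, e1⟩ := head_of_startswith line '+' [] h1.1
  obtain ⟨t2, e2⟩ := head_of_startswith line '-' [] h2.1
  rw [e1] at e2
  injection e2 with ec _
  exact absurd ec (by decide)

theorem cdict_append (body : List String) (line : String) :
    cdict (body ++ [line]) =
      if pIns line then (cdict body).modify "insertions" 0 (· + 1)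
      else if pDel line then (cdict body).modify "deletions" 0 (· + 1)
      else cdict body := by
  have c1 : (body ++ [line]).countP pIns = body.countP pIns + (if pIns line then 1 else 0) := by
    simp [List.countP_append, List.countP_cons]
  have c2 : (body ++ [line]).countP pDel = body.countP pDel + (if pDel line then 1 else 0) := by
    simp [List.countP_append, List.countP_cons]
  by_cases h1 : pIns line = true
  · have h2 : pDel line = false := by
      cases hq : pDel line
      · rfl
      · exact absurd ⟨h1, hq⟩ (not_pIns_and_pDel line)
    unfold cdict
    rw [c1, c2, h1, h2]
    simp only [if_true, modify_ins_lit]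
    congr 1
  · have h1' : pIns line = false := by simpa using h1
    by_cases h2 : pDel line = true
    · unfold cdict
      rw [c1, c2, h1', h2]
      simp only [if_true, if_false, Bool.false_eq_true, modify_del_lit]
      congr 1
    · have h2' : pDel line = false := by simpa using h2
      unfold cdict
      rw [c1, c2, h1', h2']
      simp

theorem insert_mkStats (g : PySem.Dict String (List String)) (c : String) (v : List String) :
    (mkStats g).insert c (cdict v) = mkStats (g.insert c v) := by
  unfold PySem.Dict.insert
  rw [contains_mkStats]
  split
  · simp only [mkStats, List.map_map]
    congr 1
    apply List.map_congr_left
    intro p _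
    by_cases hp : (p.1 == c) = true
    · have hpe : p.1 = c := eq_of_beq hp
      simp [hpe]
    · have hne : p.1 ≠ c := by simpa using hp
      simp [hne]
  · simp [mkStats]

theorem getD_mkStats (g : PySem.Dict String (List String)) (c : String) (hc : g.contains c = true) :
    (mkStats g).getD c PySem.Dict.empty = cdict (g.getD c []) := by
  rw [PySem.Dict.contains_eq_isSome_get?] at hc
  obtain ⟨gv, hgv⟩ := Option.isSome_iff_exists.mp hc
  simp [PySem.Dict.getD, get?_mkStats, hgv]

theorem insert_getD_self {ν : Type} (g : PySem.Dict String ν) (c : String) (d0 : ν)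
    (hc : g.contains c = true) (hnd : g.keys.Nodup) :
    g.insert c (g.getD c d0) = g := by
  unfold PySem.Dict.insert
  rw [if_pos hc]
  cases g with
  | mk items =>
    congr 1
    conv_rhs => rw [← List.map_id items]
    apply List.map_congr_left
    intro p hp
    by_cases hb : (p.1 == c) = true
    · have hpe : p.1 = c := eq_of_beq hb
      have hmem : (c, p.2) ∈ (PySem.Dict.mk items).items := by
        rw [← hpe]; exact hp
      have hgd := PySem.Dict.getD_of_mem_items _ hmem hnd d0
      simp only [hb, if_true, hgd, id_eq]
      rw [← hpe]
    · simp [hb]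

theorem modify_mkStats (g : PySem.Dict String (List String)) (c : String)
    (hc : g.contains c = true) (hnd : g.keys.Nodup) (line : String) :
    mkStats (g.modify c [] (fun b => b ++ [line])) =
      if pIns line then (mkStats g).modify c PySem.Dict.empty (fun d => d.modify "insertions" 0 (· + 1))
      else if pDel line then (mkStats g).modify c PySem.Dict.empty (fun d => d.modify "deletions" 0 (· + 1))
      else mkStats g := by
  have hm : g.modify c [] (fun b => b ++ [line]) = g.insert c (g.getD c [] ++ [line]) := rfl
  have hca := cdict_append (g.getD c []) line
  have houter : ∀ (F : PySem.Dict String Int → PySem.Dict String Int),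
      (mkStats g).modify c PySem.Dict.empty F = (mkStats g).insert c (F (cdict (g.getD c []))) := by
    intro F
    rw [show (mkStats g).modify c PySem.Dict.empty F
          = (mkStats g).insert c (F ((mkStats g).getD c PySem.Dict.empty)) from rfl,
        getD_mkStats g c hc]
  by_cases h1 : pIns line = true
  · rw [hm, ← insert_mkStats, if_pos h1, houter]
    rw [if_pos h1] at hca
    rw [← hca]
  · by_cases h2 : pDel line = true
    · rw [hm, ← insert_mkStats, if_neg h1, if_pos h2, houter]
      rw [if_neg h1, if_pos h2] at hca
      rw [← hca]
    · rw [hm, ← insert_mkStats, if_neg h1, if_neg h2]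
      rw [if_neg h1, if_neg h2] at hca
      rw [hca, insert_mkStats, insert_getD_self g c [] hc hnd]

theorem startswith_ne_head (line : String) (c c' : Char) (cs cs' : List Char)
    (h : PySem.Str.startswith line (String.ofList (c :: cs)) = true) (hne : c' ≠ c) :
    PySem.Str.startswith line (String.ofList (c' :: cs')) = false := by
  cases hq : PySem.Str.startswith line (String.ofList (c' :: cs')) with
  | false => rfl
  | true =>
    obtain ⟨t, e⟩ := head_of_startswith line c cs h
    obtain ⟨t', e'⟩ := head_of_startswith line c' cs' hq
    rw [e] at e'
    injection e' with ec _
    exact absurd ec.symm hne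

theorem pflags_of_skip (line : String)
    (h : (PySem.Str.startswith line "+++ " || PySem.Str.startswith line "--- " ||
          PySem.Str.startswith line "@@" || PySem.Str.startswith line "===") = true) :
    pIns line = false ∧ pDel line = false := by
  simp only [Bool.or_eq_true] at h
  have conv1 : (String.ofList ['+'] : String) = "+" := rfl
  have conv2 : (String.ofList ['-'] : String) = "-" := rfl
  rcases h with ((h | h) | h) | h
  · have h' : PySem.Str.startswith line (String.ofList ['+','+','+',' ']) = true := h
    have hm := startswith_ne_head line '+' '-' ['+','+',' '] [] h' (by decide)
    rw [conv2] at hm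
    exact ⟨by simp only [pIns, h, Bool.not_true, Bool.and_false],
      by simp only [pDel, hm, Bool.false_and]⟩
  · have h' : PySem.Str.startswith line (String.ofList ['-','-','-',' ']) = true := h
    have hm := startswith_ne_head line '-' '+' ['-','-',' '] [] h' (by decide)
    rw [conv1] at hm
    exact ⟨by simp only [pIns, hm, Bool.false_and],
      by simp only [pDel, h, Bool.not_true, Bool.and_false]⟩
  · have h' : PySem.Str.startswith line (String.ofList ['@','@']) = true := h
    have hp := startswith_ne_head line '@' '+' ['@'] [] h' (by decide)
    have hm := startswith_ne_head line '@' '-' ['@'] [] h' (by decide)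
    rw [conv1] at hp; rw [conv2] at hm
    exact ⟨by simp only [pIns, hp, Bool.false_and], by simp only [pDel, hm, Bool.false_and]⟩
  · have h' : PySem.Str.startswith line (String.ofList ['=','=','=']) = true := h
    have hp := startswith_ne_head line '=' '+' ['=','='] [] h' (by decide)
    have hm := startswith_ne_head line '=' '-' ['=','='] [] h' (by decide)
    rw [conv1] at hp; rw [conv2] at hm
    exact ⟨by simp only [pIns, hp, Bool.false_and], by simp only [pDel, hm, Bool.false_and]⟩

theorem step_eq (cur : Option String) (g : PySem.Dict String (List String))
    (hc : ∀ c, cur = some c → g.contains c = true) (hnd : g.keys.Nodup) (line : String) :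
    stepA (cur, mkStats g) line = ((stepB (cur, g) line).1, mkStats ((stepB (cur, g) line).2)) := by
  unfold stepA stepB
  by_cases hidx : PySem.Str.startswith line "Index: " = true
  · simp only [hidx, if_true]
    exact congrArg _ (setdefault_mkStats g _)
  · simp only [hidx, Bool.false_eq_true, if_false]
    cases cur with
    | none => rfl
    | some c =>
      have hcc : g.contains c = true := hc c rfl
      by_cases hskip : (PySem.Str.startswith line "+++ " || PySem.Str.startswith line "--- " ||
          PySem.Str.startswith line "@@" || PySem.Str.startswith line "===") = true
      · obtain ⟨hpi, hpd⟩ := pflags_of_skip line hskip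
        simp only [hskip, if_true]
        have := modify_mkStats g c hcc hnd line
        rw [hpi, hpd] at this
        simp only [Bool.false_eq_true, if_false] at this
        simp [this.symm]
      · simp only [hskip, Bool.false_eq_true, if_false]
        simp only [Bool.or_eq_true, not_or] at hskip
        obtain ⟨⟨⟨h1, h2⟩, h3⟩, h4⟩ := hskip
        have h1' : PySem.Str.startswith line "+++ " = false := by simpa using h1
        have h2' : PySem.Str.startswith line "--- " = false := by simpa using h2
        by_cases hplus : PySem.Str.startswith line "+" = true
        · have hpi : pIns line = true := by
            simp only [pIns, hplus, h1', Bool.not_false, Bool.and_self]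
          simp only [hplus, if_true]
          have := modify_mkStats g c hcc hnd line
          rw [hpi] at this
          simp only [if_true] at this
          exact congrArg _ this.symm
        · have hplus' : PySem.Str.startswith line "+" = false := by simpa using hplus
          have hpi : pIns line = false := by simp only [pIns, hplus', Bool.false_and]
          simp only [hplus, Bool.false_eq_true, if_false]
          by_cases hminus : PySem.Str.startswith line "-" = true
          · have hpd : pDel line = true := by
              simp only [pDel, hminus, h2', Bool.not_false, Bool.and_self]
            simp only [hminus, if_true]
            have := modify_mkStats g c hcc hnd line
            rw [hpi, hpd] at this
            simp only [Bool.false_eq_true, if_false, if_true] at this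
            exact congrArg _ this.symm
          · have hminus' : PySem.Str.startswith line "-" = false := by simpa using hminus
            have hpd : pDel line = false := by simp only [pDel, hminus', Bool.false_and]
            simp only [hminus, Bool.false_eq_true, if_false]
            have := modify_mkStats g c hcc hnd line
            rw [hpi, hpd] at this
            simp only [Bool.false_eq_true, if_false] at this
            simp [this.symm]

theorem stepB_inv (cur : Option String) (g : PySem.Dict String (List String))
    (hc : ∀ c, cur = some c → g.contains c = true) (hnd : g.keys.Nodup) (line : String) :
    (∀ c', (stepB (cur, g) line).1 = some c' → (stepB (cur, g) line).2.contains c' = true) ∧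
      (stepB (cur, g) line).2.keys.Nodup := by
  unfold stepB
  by_cases hidx : PySem.Str.startswith line "Index: " = true
  · simp only [hidx, if_true]
    constructor
    · intro c' hcc'
      injection hcc' with hcc'
      subst hcc'
      unfold PySem.Dict.setdefault
      split
      · assumption
      · simp [PySem.Dict.contains]
    · rw [PySem.Dict.keys_setdefault]
      split
      · exact hnd
      · refine List.Nodup.append hnd (List.nodup_singleton _) ?_
        intro a ha hb
        have : g.contains (PySem.Str.strip (PySem.Str.slice line (some 7) none)) = true := by
          rw [PySem.Dict.contains_iff_mem_keys]
          simpa using (List.mem_singleton.mp hb ▸ ha)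
        simp_all
  · simp only [hidx, Bool.false_eq_true, if_false]
    cases cur with
    | none => exact ⟨hc, hnd⟩
    | some c =>
      have hcc : g.contains c = true := hc c rfl
      constructor
      · intro c' hcc'
        injection hcc' with hcc'
        subst hcc'
        rw [PySem.Dict.contains_modify]
        simp
      · have hk := PySem.Dict.keys_modify g c [] (fun b => b ++ [line])
        rw [hk, PySem.Dict.keys_insert_of_contains _ _ hcc]
        exact hnd

theorem loop_eq (lines : List String) (cur : Option String) (g : PySem.Dict String (List String))
    (hc : ∀ c, cur = some c → g.contains c = true) (hnd : g.keys.Nodup) :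
    lines.foldl stepA (cur, mkStats g) =
      ((lines.foldl stepB (cur, g)).1, mkStats ((lines.foldl stepB (cur, g)).2)) := by
  induction lines generalizing cur g with
  | nil => rfl
  | cons line rest ih =>
    simp only [List.foldl_cons]
    rw [step_eq cur g hc hnd line]
    obtain ⟨hc', hnd'⟩ := stepB_inv cur g hc hnd line
    have := ih (stepB (cur, g) line).1 (stepB (cur, g) line).2 hc' hnd'
    simpa using this

def lineFor (p : String × List String) : String :=
  p.1 ++ " | " ++ PySem.Int.toStr (p.2.countP pIns : Int) ++ " insertion(s)(+), " ++
    PySem.Int.toStr (p.2.countP pDel : Int) ++ " deletion(s)(-)"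

def insOf (p : String × List String) : Int := (p.2.countP pIns : Int)
def delOf (p : String × List String) : Int := (p.2.countP pDel : Int)

theorem bfold_spec (items : List (String × List String)) (accL : List String) (accI accD : Int) :
    items.foldl (fun (st : List String × Int × Int) p =>
        let ins : Int := (p.2.countP (fun l => PySem.Str.startswith l "+" && !PySem.Str.startswith l "+++ ") : Int)
        let dels : Int := (p.2.countP (fun l => PySem.Str.startswith l "-" && !PySem.Str.startswith l "--- ") : Int)
        (st.1 ++ [p.1 ++ " | " ++ PySem.Int.toStr ins ++ " insertion(s)(+), " ++
            PySem.Int.toStr dels ++ " deletion(s)(-)"],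
         st.2.1 + ins, st.2.2 + dels)) (accL, accI, accD) =
      (accL ++ items.map lineFor, accI + (items.map insOf).sum, accD + (items.map delOf).sum) := by
  induction items generalizing accL accI accD with
  | nil => simp
  | cons p rest ih =>
    simp only [List.foldl_cons, List.map_cons, List.sum_cons]
    rw [ih]
    rw [show (fun l => PySem.Str.startswith l "+" && !PySem.Str.startswith l "+++ ") = pIns from rfl,
        show (fun l => PySem.Str.startswith l "-" && !PySem.Str.startswith l "--- ") = pDel from rfl]
    simp only [lineFor, insOf, delOf, Prod.mk.injEq, List.append_assoc, List.singleton_append]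
    exact ⟨trivial, by ring, by ring⟩

theorem ab_eq (s : String) : generate_diffstat s = generate_diffstat_alt s := by
  unfold generate_diffstat generate_diffstat_alt
  by_cases h0 : (s == "" || PySem.Str.strip s == "") = true
  · simp only [h0, if_true]
  · simp only [h0, Bool.false_eq_true, if_false]
    have hloop := loop_eq (PySem.Str.splitlines s) none PySem.Dict.empty
      (by intro c h; cases h) PySem.Dict.nodup_keys_empty
    have hinit : (mkStats PySem.Dict.empty) = (PySem.Dict.empty : PySem.Dict String (PySem.Dict String Int)) := rfl
    rw [hinit] at hloop
    set g' := ((PySem.Str.splitlines s).foldl stepB (none, PySem.Dict.empty)).2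
    have h2 : ((PySem.Str.splitlines s).foldl stepA (none, PySem.Dict.empty)).2 = mkStats g' := by
      rw [hloop]
    rw [h2]
    by_cases he : g'.items = []
    · simp [mkStats, he]
    · have heA : ¬ (mkStats g').items = [] := by simp [mkStats, he]
      rw [if_neg heA, if_neg he]
      have hsize : (mkStats g').size = g'.size := by simp [mkStats, PySem.Dict.size]
      have hvalsI : ((mkStats g').values.map (fun v => v.getD "insertions" 0)) = g'.items.map insOf := by
        simp only [mkStats, PySem.Dict.values, List.map_map]
        rfl
      have hvalsD : ((mkStats g').values.map (fun v => v.getD "deletions" 0)) = g'.items.map delOf := by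
        simp only [mkStats, PySem.Dict.values, List.map_map]
        rfl
      have hlines : (mkStats g').items.foldl (fun acc p =>
          acc ++ [p.1 ++ " | " ++ PySem.Int.toStr (p.2.getD "insertions" 0) ++ " insertion(s)(+), " ++
            PySem.Int.toStr (p.2.getD "deletions" 0) ++ " deletion(s)(-)"]) [] = g'.items.map lineFor := by
        rw [PySem.List.foldl_append_singleton_eq_map]
        simp only [List.nil_append, mkStats, List.map_map]
        rfl
      simp only [bfold_spec, hlines, hsize, hvalsI, hvalsD, List.nil_append, zero_add]

-- ===== VERDICT (by name: the statement is the Claim_ definition above) =====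
theorem generate_diffstat_spec : Claim_equal_generate_diffstat := by
  intro diff_content _
  unfold Spec_generate_diffstat
  exact ab_eq diff_content
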